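-- pv_equiv track=rewrite | github.com/Wenbobobo/AutoArchon | archonlib/campaign.py | _allowed_file_candidates_from_scope_hint
-- ===== SOURCE A (Python) =====
-- def _allowed_file_candidates_from_scope_hint(scope_hint: str | None) -> list[str]:
--     if not isinstance(scope_hint, str) or not scope_hint.strip():
--         return []
--     candidates = [item.strip() for item in scope_hint.split(",")]
--     normalized: list[str] = []
--     seen: set[str] = set()
--     for candidate in candidates:
--         if not candidate or not candidate.endswith(".lean") or candidate.startswith("/"):
--             return []
--         if candidate in seen:
--             return []
--         seen.add(candidate)
--         normalized.append(candidate)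
--     return normalized
-- ===== SOURCE B (Python) =====
-- def _allowed_file_candidates_from_scope_hint(scope_hint):
--     if not isinstance(scope_hint, str) or not scope_hint.strip():
--         return []
--     def build(items):
--         # back-to-front recursion: None signals any violation anywhere
--         if not items:
--             return []
--         head = items[0].strip()
--         tail = build(items[1:])
--         if tail is None or not head or not head.endswith(".lean") \
--                 or head.startswith("/") or head in tail:
--             return None
--         return [head] + tail
--     out = build(scope_hint.split(","))
--     return out if out is not None else []
-- ===== Notes on version B (the rewrite author's own statement) =====
-- stated objective: alternative
-- what changed: Replaces A's forward loop with early returns and an incrementally maintained seen-set by a back-to-front recursion producing an Option-style result: there is no precomputed stripped list and no set at all — each item is stripped inside the recursion and duplicates are detected by list membership in the already-validated tail, with failure propagated as None.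
import Mathlib
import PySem

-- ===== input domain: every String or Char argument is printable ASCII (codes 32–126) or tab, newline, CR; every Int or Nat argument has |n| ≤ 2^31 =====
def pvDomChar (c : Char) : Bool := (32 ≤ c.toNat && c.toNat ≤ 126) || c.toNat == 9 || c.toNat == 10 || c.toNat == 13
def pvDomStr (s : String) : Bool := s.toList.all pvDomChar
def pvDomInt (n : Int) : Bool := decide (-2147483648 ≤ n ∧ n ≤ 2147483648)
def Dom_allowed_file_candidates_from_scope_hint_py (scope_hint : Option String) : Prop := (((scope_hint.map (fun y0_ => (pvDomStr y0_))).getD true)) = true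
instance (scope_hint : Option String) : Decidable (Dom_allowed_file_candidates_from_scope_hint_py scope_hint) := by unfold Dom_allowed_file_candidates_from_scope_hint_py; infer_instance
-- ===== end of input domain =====

-- B replaces A's forward early-return loop with an incrementally maintained seen-set
-- by a back-to-front Option-style recursion with no set: strips inside the recursion
-- and detects duplicates by membership in the already-validated tail; objective: alternative.


-- ===== PORT A =====
-- the 'for candidate in candidates' loop, with early returns, seen set and accumulator
def pvLoopA : List String → PySem.Set String → List String → List String
  | [], _, normalized => normalized
  | c :: rest, seen, normalized =>
    if (c == "") || !(PySem.Str.endswith c ".lean") || PySem.Str.startswith c "/" then []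
    else if PySem.Set.contains seen c then []
    else pvLoopA rest (PySem.Set.add seen c) (normalized ++ [c])

def allowed_file_candidates_from_scope_hint_py (scope_hint : Option String) : List String :=
  match scope_hint with
  | none => []
  | some s =>
    if PySem.Str.strip s == "" then []
    else pvLoopA (((PySem.Str.split? s ",").getD []).map PySem.Str.strip) PySem.Set.empty []

-- ===== PORT B =====
-- the inner recursive 'build': strips the head, recurses on the tail first,
-- then the Python guard 'tail is None or not head or ... or head in tail'
def pvBuildB : List String → Option (List String)
  | [] => some []
  | x :: rest =>
    let head := PySem.Str.strip x
    match pvBuildB rest with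
    | none => none
    | some tail =>
      if (head == "") || !(PySem.Str.endswith head ".lean")
          || PySem.Str.startswith head "/" || tail.contains head then none
      else some (head :: tail)

def allowed_file_candidates_from_scope_hint_py_alt (scope_hint : Option String) : List String :=
  match scope_hint with
  | none => []
  | some s =>
    if PySem.Str.strip s == "" then []
    else
      match pvBuildB ((PySem.Str.split? s ",").getD []) with
      | some out => out
      | none => []

-- ===== PRECONDITION & SPEC =====
def Spec_allowed_file_candidates_from_scope_hint_py (scope_hint : Option String) (out : List String) : Prop := out = allowed_file_candidates_from_scope_hint_py_alt scope_hint
instance (scope_hint : Option String) (out : List String) : Decidable (Spec_allowed_file_candidates_from_scope_hint_py scope_hint out) := by unfold Spec_allowed_file_candidates_from_scope_hint_py; infer_instance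

-- ===== CLAIM (what is proved, stated in full; the proofs are below) =====
def Claim_equal_allowed_file_candidates_from_scope_hint_py : Prop := ∀ (scope_hint : Option String), Dom_allowed_file_candidates_from_scope_hint_py scope_hint → Spec_allowed_file_candidates_from_scope_hint_py scope_hint (allowed_file_candidates_from_scope_hint_py scope_hint)

-- ===== LEMMAS AND PROOFS =====

def pvValid (c : String) : Bool :=
  !(c == "") && PySem.Str.endswith c ".lean" && !(PySem.Str.startswith c "/")

theorem pv_guard_eq (c : String) :
    ((c == "") || !(PySem.Str.endswith c ".lean") || PySem.Str.startswith c "/")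
      = !pvValid c := by
  unfold pvValid
  cases c == "" <;> cases PySem.Str.endswith c ".lean" <;>
    cases PySem.Str.startswith c "/" <;> rfl

theorem pvLoopA_characterization (l : List String) (seen : PySem.Set String)
    (acc : List String) :
    pvLoopA l seen acc =
      if l.all pvValid ∧ l.Nodup ∧ ∀ c ∈ l, c ∉ seen then acc ++ l else [] := by
  induction l generalizing seen acc with
  | nil => simp [pvLoopA]
  | cons c rest ih =>
    rw [pvLoopA, pv_guard_eq]
    by_cases hv : pvValid c = true
    · rw [hv]
      simp only [Bool.not_true, Bool.false_eq_true, if_false]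
      by_cases hc : c ∈ seen
      · rw [if_pos ((PySem.Set.contains_iff seen c).mpr hc)]
        rw [if_neg]
        rintro ⟨-, -, hmem⟩
        exact hmem c (by simp) hc
      · have hcf : seen.contains c = false := by
          cases hb : PySem.Set.contains seen c
          · rfl
          · exact absurd ((PySem.Set.contains_iff seen c).mp hb) hc
        rw [hcf]
        simp only [Bool.false_eq_true, if_false]
        rw [ih]
        by_cases hcond : rest.all pvValid ∧ rest.Nodup ∧ ∀ x ∈ rest, x ∉ PySem.Set.add seen c
        · rw [if_pos hcond, if_pos]
          · simp
          · refine ⟨by simp [hv, hcond.1], List.nodup_cons.mpr ⟨fun hcr => ?_, hcond.2.1⟩, ?_⟩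
            · exact (hcond.2.2 c hcr) ((PySem.Set.mem_add seen c c).mpr (Or.inr rfl))
            · intro x hx
              rw [List.mem_cons] at hx
              rcases hx with rfl | hx
              · exact hc
              · intro hxs
                exact hcond.2.2 x hx ((PySem.Set.mem_add seen c x).mpr (Or.inl hxs))
        · rw [if_neg hcond, if_neg]
          rintro ⟨hall, hnd, hmem⟩
          simp only [List.all_cons, Bool.and_eq_true] at hall
          rw [List.nodup_cons] at hnd
          refine hcond ⟨hall.2, hnd.2, fun x hx hmemadd => ?_⟩
          rcases (PySem.Set.mem_add seen c x).mp hmemadd with hxs | rfl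
          · exact hmem x (by simp [hx]) hxs
          · exact hnd.1 hx
    · rw [Bool.not_eq_true] at hv
      rw [hv]
      simp only [Bool.not_false, if_true]
      rw [if_neg]
      rintro ⟨hall, -⟩
      simp only [List.all_cons, Bool.and_eq_true] at hall
      rw [hall.1] at hv
      simp at hv

theorem pvBuildB_characterization (l : List String) :
    pvBuildB l =
      if (l.map PySem.Str.strip).all pvValid ∧ (l.map PySem.Str.strip).Nodup
      then some (l.map PySem.Str.strip) else none := by
  induction l with
  | nil => simp [pvBuildB]
  | cons x rest ih =>
    rw [pvBuildB, ih]
    by_cases hr : (rest.map PySem.Str.strip).all pvValid ∧ (rest.map PySem.Str.strip).Nodup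
    · rw [if_pos hr]
      simp only
      have hguard : ((PySem.Str.strip x == "") || !(PySem.Str.endswith (PySem.Str.strip x) ".lean")
          || PySem.Str.startswith (PySem.Str.strip x) "/"
          || (rest.map PySem.Str.strip).contains (PySem.Str.strip x))
          = (!pvValid (PySem.Str.strip x) || (rest.map PySem.Str.strip).contains (PySem.Str.strip x)) := by
        rw [← pv_guard_eq]
      rw [hguard]
      by_cases hv : pvValid (PySem.Str.strip x) = true
      · by_cases hm : PySem.Str.strip x ∈ rest.map PySem.Str.strip
        · rw [if_pos (by simp [hv, hm]), if_neg]
          rintro ⟨-, hnd⟩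
          simp only [List.map_cons, List.nodup_cons] at hnd
          exact hnd.1 hm
        · rw [if_neg (by simp [hv, hm]), if_pos]
          · simp
          · refine ⟨by simp [hv, hr.1], ?_⟩
            simp only [List.map_cons, List.nodup_cons]
            exact ⟨hm, hr.2⟩
      · rw [if_pos (by simp [Bool.not_eq_true] at hv ⊢; simp [hv]), if_neg]
        rintro ⟨hall, -⟩
        simp only [List.map_cons, List.all_cons, Bool.and_eq_true] at hall
        exact hv hall.1
    · rw [if_neg hr]
      simp only
      rw [if_neg]
      rintro ⟨hall, hnd⟩
      simp only [List.map_cons, List.all_cons, Bool.and_eq_true] at hall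
      simp only [List.map_cons, List.nodup_cons] at hnd
      exact hr ⟨hall.2, hnd.2⟩

-- ===== VERDICT (by name: the statement is the Claim_ definition above) =====
theorem allowed_file_candidates_from_scope_hint_py_spec : Claim_equal_allowed_file_candidates_from_scope_hint_py := by
  intro scope_hint _
  unfold Spec_allowed_file_candidates_from_scope_hint_py
  unfold allowed_file_candidates_from_scope_hint_py allowed_file_candidates_from_scope_hint_py_alt
  match scope_hint with
  | none => rfl
  | some s =>
    simp only
    split
    · rfl
    · rw [pvLoopA_characterization, pvBuildB_characterization]
      generalize (PySem.Str.split? s ",").getD [] = items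
      have hA : ∀ c ∈ items.map PySem.Str.strip, c ∉ PySem.Set.empty := fun c _ hc => by
        simp [PySem.Set.empty] at hc
      split_ifs with h1 h2 h2
      · simp
      · exact absurd ⟨h1.1, h1.2.1⟩ h2
      · exact absurd ⟨h2.1, h2.2, hA⟩ h1
      · rfl
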